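-- pv_equiv track=rewrite | github.com/RichenLee/CRISPRBEDesign | CRISPRBEDesign.py | tell_window
-- ===== SOURCE A (Python) =====
-- def find_all(string, sub):
-- 	start = 0
-- 	pos = []
-- 	while True:
-- 		start = string.find(sub, start)
-- 		if start == -1:
-- 			return pos
-- 		pos.append(start)
-- 		start += len(sub)
-- 	return pos
--
-- def tell_window(sequence,base,window_size,window_start):
-- 	flag=False
-- 	loc=''
-- 	window_start=window_start-1
-- 	window_sequence=sequence[window_start:(window_start+window_size)]
-- 	if base in window_sequence:
-- 		flag=True
-- 	if flag:
-- 		loc_list=find_all(window_sequence,base)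
-- 		loc=','.join([str(i+window_start+1) for i in loc_list])
-- 	return flag,loc
-- ===== SOURCE B (Python) =====
-- def tell_window(sequence, base, window_size, window_start):
--     window_start -= 1
--     window = sequence[window_start:window_start + window_size]
--     parts = window.split(base)
--     locs = []
--     pos = 0
--     for seg in parts[:-1]:
--         pos += len(seg)
--         locs.append(pos + window_start + 1)
--         pos += len(base)
--     return (len(parts) > 1, ','.join(map(str, locs)))
-- ===== Notes on version B (the rewrite author's own statement) =====
-- stated objective: idiomatic
-- what changed: B has no find/scan loop at all: it splits the window on base once (str.split yields exactly the non-overlapping leftmost-match segments) and reconstructs the match positions by a prefix-sum over segment lengths, deriving the flag from the segment count; Pre_ excludes base = '', where A loops forever (find_all never advances) and B's split raises ValueError.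
import Mathlib
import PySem

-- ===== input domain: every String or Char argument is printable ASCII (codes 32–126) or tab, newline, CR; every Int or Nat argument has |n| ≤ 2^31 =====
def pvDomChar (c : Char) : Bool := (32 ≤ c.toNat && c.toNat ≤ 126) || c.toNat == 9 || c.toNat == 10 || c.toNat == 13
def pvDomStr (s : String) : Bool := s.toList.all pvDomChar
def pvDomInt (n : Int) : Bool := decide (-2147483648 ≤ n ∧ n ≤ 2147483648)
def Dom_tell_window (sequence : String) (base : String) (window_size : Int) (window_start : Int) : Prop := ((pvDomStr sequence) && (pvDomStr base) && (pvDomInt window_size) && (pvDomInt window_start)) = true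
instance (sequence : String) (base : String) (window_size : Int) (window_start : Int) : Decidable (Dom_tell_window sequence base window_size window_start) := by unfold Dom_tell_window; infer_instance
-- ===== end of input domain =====

-- B contains no find/scan loop: it splits the window on base once and reconstructs
-- the match positions by a prefix-sum over segment lengths (objective: idiomatic).

-- ===== PORT A =====
-- find_all's 'while True' loop; the fuel (length of the string + 1) only makes the
-- recursion total: for sub ≠ [] each iteration advances start by at least 1, so the
-- fuel is never exhausted on inputs admitted by Pre_.
def pvFindAllGo (string sub : List Char) (fuel : Nat) (start : Int) (pos : List Int) : List Int :=
  match fuel with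
  | 0 => pos
  | f + 1 =>
    let s := PySem.Chars.findFrom string sub start
    if s = -1 then pos
    else pvFindAllGo string sub f (s + (sub.length : Int)) (pos ++ [s])

def pvFindAll (string sub : List Char) : List Int :=
  pvFindAllGo string sub (string.length + 1) 0 []

def tell_window (sequence : String) (base : String) (window_size : Int) (window_start : Int) : Bool × String :=
  let ws : Int := window_start - 1
  let window_sequence : List Char := PySem.List.slice sequence.toList (some ws) (some (ws + window_size))
  let flag : Bool := PySem.Chars.isIn base.toList window_sequence
  let loc : String :=
    if flag then
      PySem.Str.join "," ((pvFindAll window_sequence base.toList).map (fun i => PySem.Int.toStr (i + ws + 1)))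
    else ""
  (flag, loc)

-- ===== PORT B =====
def tell_window_alt (sequence : String) (base : String) (window_size : Int) (window_start : Int) : Bool × String :=
  let ws : Int := window_start - 1
  let window : List Char := PySem.List.slice sequence.toList (some ws) (some (ws + window_size))
  match PySem.Chars.split? window base.toList with
  | none => (false, "")  -- window.split('') raises ValueError; base = "" is outside Pre_
  | some parts =>
    -- the 'for seg in parts[:-1]' loop with its (locs, pos) state
    let locs := (PySem.List.slice parts none (some (-1))).foldl
      (fun (a : List Int × Int) (seg : List Char) =>
        let pos := a.2 + (seg.length : Int)
        (a.1 ++ [pos + ws + 1], pos + (base.toList.length : Int))) ([], 0)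
    (decide (1 < parts.length), PySem.Str.join "," (locs.1.map PySem.Int.toStr))

-- ===== PRECONDITION & SPEC =====
-- Pre_ excludes only base = "": there Python A never returns (find_all loops forever,
-- since ''.find('', start) keeps returning start), and Python B raises ValueError.
def Pre_tell_window (sequence : String) (base : String) (window_size : Int) (window_start : Int) : Prop :=
  base ≠ ""
instance (sequence : String) (base : String) (window_size : Int) (window_start : Int) : Decidable (Pre_tell_window sequence base window_size window_start) := by unfold Pre_tell_window; infer_instance

def pvWitness_tell_window : String × String × Int × Int := ("ACGTAC", "A", 5, 1)

def Spec_tell_window (sequence : String) (base : String) (window_size : Int) (window_start : Int) (out : Bool × String) : Prop := out = tell_window_alt sequence base window_size window_start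
instance (sequence : String) (base : String) (window_size : Int) (window_start : Int) (out : Bool × String) : Decidable (Spec_tell_window sequence base window_size window_start out) := by unfold Spec_tell_window; infer_instance

-- ===== CLAIM (what is proved, stated in full; the proofs are below) =====
def Claim_equal_tell_window : Prop := ∀ (sequence : String) (base : String) (window_size : Int) (window_start : Int), Dom_tell_window sequence base window_size window_start → Pre_tell_window sequence base window_size window_start → Spec_tell_window sequence base window_size window_start (tell_window sequence base window_size window_start)

-- ===== LEMMAS AND PROOFS =====

-- The common mathematical description: the non-overlapping match positions of sub
-- in w, scanning left to right from index i.
def pvMatches (w sub : List Char) (i : Nat) : List Int :=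
  if h : i < w.length ∧ sub ≠ [] then
    if sub <+: w.drop i then (i : Int) :: pvMatches w sub (i + sub.length)
    else pvMatches w sub (i + 1)
  else []
termination_by w.length - i
decreasing_by
  · have : 0 < sub.length := List.length_pos_iff.mpr h.2
    omega
  · omega

theorem pvMatches_nil (w sub : List Char) (i : Nat)
    (h : ∀ j, i ≤ j → ¬ sub <+: w.drop j) : pvMatches w sub i = [] := by
  fun_induction pvMatches w sub i with
  | case1 i h1 hpre ih => exact absurd hpre (h i le_rfl)
  | case2 i h1 hpre ih => exact ih (fun j hj => h j (by omega))
  | case3 i h1 => rfl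

theorem pvPrefix_drop_infix {w sub : List Char} {k j : Nat} (hkj : k ≤ j)
    (h : sub <+: w.drop j) : sub <:+: w.drop k := by
  have : w.drop j = (w.drop k).drop (j - k) := by
    rw [List.drop_drop]; congr 1; omega
  rw [this] at h
  exact h.isInfix.trans (List.drop_suffix _ _).isInfix

theorem pvMatches_no_infix (w sub : List Char) (k : Nat)
    (h : ¬ sub <:+: w.drop k) : pvMatches w sub k = [] := by
  refine pvMatches_nil w sub k (fun j hj hpre => h (pvPrefix_drop_infix hj hpre))

theorem pvMatches_first (w sub : List Char) (hsub : sub ≠ []) (i j : Nat) (hij : i ≤ j)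
    (hpre : sub <+: w.drop j) (hmin : ∀ m, i ≤ m → m < j → ¬ sub <+: w.drop m) :
    pvMatches w sub i = (j : Int) :: pvMatches w sub (j + sub.length) := by
  have hjlt : j < w.length := by
    have h1 : 0 < sub.length := List.length_pos_iff.mpr hsub
    have h2 : sub.length ≤ (w.drop j).length := hpre.length_le
    simp at h2; omega
  induction hd : j - i generalizing i with
  | zero =>
    have : i = j := by omega
    subst this
    rw [pvMatches]
    simp [hjlt, hsub, hpre]
  | succ n ih =>
    have hlt : i < j := by omega
    rw [pvMatches]
    have : ¬ sub <+: w.drop i := hmin i le_rfl hlt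
    simp only [dif_pos (And.intro (by omega : i < w.length) hsub), if_neg this]
    exact ih (i + 1) (by omega) (fun m hm hmj => hmin m (by omega) hmj) (by omega)

theorem pvFindAllGo_eq (w sub : List Char) (hsub : sub ≠ []) :
    ∀ (f : Nat) (k : Nat) (pos : List Int), k ≤ w.length → w.length + 1 - k ≤ f →
      pvFindAllGo w sub f (k : Int) pos = pos ++ pvMatches w sub k := by
  intro f
  induction f with
  | zero => intro k pos hk hf; omega
  | succ f ih =>
    intro k pos hk hf
    rw [pvFindAllGo]
    rw [PySem.Chars.findFrom_natCast w sub k hk]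
    by_cases hfind : PySem.Chars.find (w.drop k) sub = -1
    · simp only [hfind, reduceIte]
      rw [pvMatches_no_infix w sub k ((PySem.Chars.find_eq_neg_one_iff _ _).mp hfind)]
      simp
    · have hnn : 0 ≤ PySem.Chars.find (w.drop k) sub := by
        have := PySem.Chars.neg_one_le_find (w.drop k) sub
        omega
      set j0 := PySem.Chars.find (w.drop k) sub with hj0
      have hspec := PySem.Chars.find_spec (s := w.drop k) (sub := sub) hnn
      set j : Nat := k + j0.toNat with hjdef
      have hL : 0 < sub.length := List.length_pos_iff.mpr hsub
      have hdropj : (w.drop k).drop j0.toNat = w.drop j := by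
        rw [List.drop_drop]
      have hprej : sub <+: w.drop j := by rw [← hdropj]; exact hspec.1
      have hjlt : j < w.length := by
        have h1 : 0 < sub.length := List.length_pos_iff.mpr hsub
        have h2 : sub.length ≤ (w.drop j).length := hprej.length_le
        simp at h2; omega
      have hjL : j + sub.length ≤ w.length := by
        have h2 : sub.length ≤ (w.drop j).length := hprej.length_le
        simp at h2; omega
      have hmin : ∀ m, k ≤ m → m < j → ¬ sub <+: w.drop m := by
        intro m hm hmj hpre
        have h3 := hspec.2 (m - k) (by omega)
        rw [List.drop_drop] at h3
        have he : k + (m - k) = m := by omega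
        rw [he] at h3
        exact h3 hpre
      have hne : ¬ ((k : Int) + j0 = -1) := by omega
      simp only [if_neg hfind, if_neg hne]
      have hcast : (k : Int) + j0 + (sub.length : Int) = ((j + sub.length : Nat) : Int) := by
        push_cast; omega
      have hcast2 : (k : Int) + j0 = (j : Int) := by omega
      rw [hcast, ih (j + sub.length) (pos ++ [(k : Int) + j0]) hjL (by omega)]
      rw [pvMatches_first w sub hsub k j (by omega) hprej hmin, hcast2]
      simp

theorem pvMatches_ne_nil_iff (w sub : List Char) (hsub : sub ≠ []) :
    PySem.Chars.isIn sub w = true ↔ pvMatches w sub 0 ≠ [] := by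
  constructor
  · intro h
    have hfind : 0 ≤ PySem.Chars.find w sub := by
      rw [PySem.Chars.find_nonneg_iff]
      have := (PySem.Chars.exists_prefix_drop_iff_isIn sub w).mpr h
      obtain ⟨j, hj⟩ := this
      simpa using pvPrefix_drop_infix (Nat.zero_le j) (by simpa using hj)
    have hspec := PySem.Chars.find_spec (s := w) (sub := sub) hfind
    rw [pvMatches_first w sub hsub 0 (PySem.Chars.find w sub).toNat (Nat.zero_le _)
      (by simpa using hspec.1) (fun m _ hm => by simpa using hspec.2 m hm)]
    simp
  · intro h
    by_contra hin
    apply h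
    apply pvMatches_no_infix
    simp only [List.drop_zero]
    intro hinf
    rw [← PySem.Chars.isIn_iff_infix] at hinf
    simp [hinf] at hin

-- ---- B side: characterising str.split ----

def pvConsHead (c : Char) (L : List (List Char)) : List (List Char) :=
  match L with
  | [] => [[c]]
  | p :: ps => (c :: p) :: ps

-- the pieces window.split(base) produces, defined structurally on the suffix
def pvPieces (sub : List Char) (hsub : sub ≠ []) (l : List Char) : List (List Char) :=
  match l with
  | [] => [[]]
  | c :: rest =>
    if sub <+: (c :: rest) then [] :: pvPieces sub hsub ((c :: rest).drop sub.length)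
    else pvConsHead c (pvPieces sub hsub rest)
termination_by l.length
decreasing_by
  · have : 0 < sub.length := List.length_pos_iff.mpr hsub
    simp; omega
  · simp

theorem pvPieces_ne_nil (sub : List Char) (hsub : sub ≠ []) (l : List Char) :
    pvPieces sub hsub l ≠ [] := by
  fun_induction pvPieces sub hsub l with
  | case1 => simp
  | case2 c rest h ih => simp
  | case3 c rest h ih => unfold pvConsHead; cases pvPieces sub hsub rest <;> simp

theorem pvGo_eq_pieces (sub : List Char) (hsub : sub ≠ []) :
    ∀ (fuel : Nat) (l cur : List Char) (acc : List (List Char)), l.length < fuel →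
      PySem.Chars.splitOn.go sub fuel l cur acc
        = acc.reverse ++ ((cur.reverse ++ (pvPieces sub hsub l).headI) :: (pvPieces sub hsub l).tail) := by
  intro fuel
  induction fuel with
  | zero => intro l cur acc h; omega
  | succ f ih =>
    intro l cur acc h
    match l with
    | [] =>
      have hgo : PySem.Chars.splitOn.go sub (f + 1) [] cur acc = (cur.reverse :: acc).reverse := by
        rw [PySem.Chars.splitOn.go.eq_def]
      rw [hgo]
      simp [pvPieces]
    | c :: rest =>
      have hgo : PySem.Chars.splitOn.go sub (f + 1) (c :: rest) cur acc =
          (if sub.isPrefixOf (c :: rest) then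
            PySem.Chars.splitOn.go sub f (List.drop sub.length (c :: rest)) [] (cur.reverse :: acc)
          else PySem.Chars.splitOn.go sub f rest (c :: cur) acc) := by
        rw [PySem.Chars.splitOn.go.eq_def]
      rw [hgo, pvPieces]
      have hL : 0 < sub.length := List.length_pos_iff.mpr hsub
      by_cases hpre : sub <+: (c :: rest)
      · rw [if_pos ((List.isPrefixOf_iff_prefix).mpr hpre), if_pos hpre]
        rw [ih _ _ _ (by simp at h ⊢; omega)]
        obtain ⟨p, ps, hps⟩ := List.exists_cons_of_ne_nil
          (pvPieces_ne_nil sub hsub ((c :: rest).drop sub.length))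
        rw [hps]
        simp
      · rw [if_neg (fun hh => hpre ((List.isPrefixOf_iff_prefix).mp hh)), if_neg hpre]
        rw [ih _ _ _ (by simp at h ⊢; omega)]
        obtain ⟨p, ps, hps⟩ := List.exists_cons_of_ne_nil (pvPieces_ne_nil sub hsub rest)
        rw [hps]
        simp [pvConsHead]

theorem pvSplitOn_eq_pieces (sub : List Char) (hsub : sub ≠ []) (l : List Char) :
    PySem.Chars.splitOn l sub = pvPieces sub hsub l := by
  unfold PySem.Chars.splitOn
  rw [pvGo_eq_pieces sub hsub _ _ _ _ (by omega)]
  obtain ⟨p, ps, hps⟩ := List.exists_cons_of_ne_nil (pvPieces_ne_nil sub hsub l)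
  rw [hps]; simp

-- positions read off a piece list by prefix-summing segment lengths
def pvLocs (subL : Int) : List (List Char) → Int → List Int
  | [], _ => []
  | [_], _ => []
  | p :: q :: ps, pos =>
    (pos + (p.length : Int)) :: pvLocs subL (q :: ps) (pos + (p.length : Int) + subL)

theorem pvLocs_consHead (subL : Int) (c : Char) (L : List (List Char)) (pos : Int)
    (h : L ≠ []) : pvLocs subL (pvConsHead c L) pos = pvLocs subL L (pos + 1) := by
  match L with
  | [] => exact absurd rfl h
  | [q] => simp [pvConsHead, pvLocs]
  | q :: r :: rs =>
    simp only [pvConsHead, pvLocs]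
    have h1 : pos + ((c :: q).length : Int) = pos + 1 + (q.length : Int) := by
      simp; ring
    rw [h1]

theorem pvLocs_eq_matches (w sub : List Char) (hsub : sub ≠ []) :
    ∀ (d k : Nat), w.length - k ≤ d → k ≤ w.length →
      pvLocs (sub.length : Int) (pvPieces sub hsub (w.drop k)) (k : Int) = pvMatches w sub k := by
  intro d
  induction d with
  | zero =>
    intro k hd hk
    have hkl : k = w.length := by omega
    subst hkl
    rw [List.drop_length, pvMatches]
    simp [pvPieces, pvLocs]
  | succ d ih =>
    intro k hd hk
    by_cases hlt : k < w.length
    · have hdrop : w.drop k = w[k] :: w.drop (k + 1) := List.drop_eq_getElem_cons hlt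
      rw [hdrop, pvPieces, ← hdrop]
      by_cases hpre : sub <+: w.drop k
      · rw [if_pos hpre]
        have hL : 0 < sub.length := List.length_pos_iff.mpr hsub
        have hlen : sub.length ≤ (w.drop k).length := hpre.length_le
        simp only [List.length_drop] at hlen
        have hdd : (w.drop k).drop sub.length = w.drop (k + sub.length) := by
          rw [List.drop_drop]
        rw [hdd]
        obtain ⟨p, ps, hps⟩ := List.exists_cons_of_ne_nil
          (pvPieces_ne_nil sub hsub (w.drop (k + sub.length)))
        rw [hps, pvLocs]
        rw [← hps]
        have hc2 : (k : Int) + (([] : List Char).length : Int) + (sub.length : Int)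
            = ((k + sub.length : Nat) : Int) := by simp
        rw [hc2, ih (k + sub.length) (by omega) (by omega)]
        rw [pvMatches_first w sub hsub k k le_rfl hpre (by omega)]
        simp
      · rw [if_neg hpre]
        rw [pvLocs_consHead _ _ _ _ (pvPieces_ne_nil sub hsub (w.drop (k + 1)))]
        have hc : (k : Int) + 1 = ((k + 1 : Nat) : Int) := by push_cast; ring
        rw [hc, ih (k + 1) (by omega) (by omega)]
        conv_rhs => rw [pvMatches]
        rw [dif_pos (And.intro hlt hsub), if_neg hpre]
    · have hkl : k = w.length := by omega
      subst hkl
      rw [List.drop_length, pvMatches]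
      simp [pvPieces, pvLocs]

theorem pvLocs_length (subL : Int) :
    ∀ (L : List (List Char)) (pos : Int), (pvLocs subL L pos).length = L.length - 1 := by
  intro L
  induction L with
  | nil => intro pos; simp [pvLocs]
  | cons p tl ih =>
    intro pos
    match tl with
    | [] => simp [pvLocs]
    | q :: ps => rw [pvLocs]; simp [ih]

theorem pvFold_eq_locs (subL ws : Int) :
    ∀ (L : List (List Char)) (pos0 : Int) (acc0 : List Int),
      (L.dropLast.foldl (fun (a : List Int × Int) (seg : List Char) =>
          (a.1 ++ [a.2 + (seg.length : Int) + ws + 1], a.2 + (seg.length : Int) + subL)) (acc0, pos0)).1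
        = acc0 ++ (pvLocs subL L pos0).map (fun i => i + ws + 1) := by
  intro L
  induction L with
  | nil => intro pos0 acc0; simp [pvLocs]
  | cons p tl ih =>
    intro pos0 acc0
    match tl with
    | [] => simp [pvLocs]
    | q :: ps =>
      rw [List.dropLast_cons₂, List.foldl_cons, pvLocs]
      rw [ih]
      simp

-- ===== VERDICT (by name: the statement is the Claim_ definition above) =====
theorem tell_window_spec : Claim_equal_tell_window := by
  intro sequence base window_size window_start _ hpre
  have hsub : base.toList ≠ [] := fun hn => hpre (String.ext (by simp [hn]))
  simp only [Spec_tell_window, tell_window, tell_window_alt]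
  set w : List Char := PySem.List.slice sequence.toList (some (window_start - 1)) (some (window_start - 1 + window_size)) with hw
  have hsplit : PySem.Chars.split? w base.toList = some (pvPieces base.toList hsub w) := by
    unfold PySem.Chars.split?
    rw [if_neg (by simpa using hsub), pvSplitOn_eq_pieces base.toList hsub w]
  rw [hsplit]
  simp only []
  have hslice : PySem.List.slice (pvPieces base.toList hsub w) none (some (-1))
      = (pvPieces base.toList hsub w).dropLast := by
    simp [PySem.List.slice, List.dropLast_eq_take]
  rw [hslice]
  have hfold := pvFold_eq_locs (base.toList.length : Int) (window_start - 1)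
    (pvPieces base.toList hsub w) 0 []
  have hlocs := pvLocs_eq_matches w base.toList hsub w.length 0 (by omega) (by omega)
  rw [List.drop_zero] at hlocs
  rw [Nat.cast_zero] at hlocs
  have hmatches : pvLocs (base.toList.length : Int) (pvPieces base.toList hsub w) 0
      = pvMatches w base.toList 0 := hlocs
  have hfindall : pvFindAll w base.toList = pvMatches w base.toList 0 := by
    unfold pvFindAll
    have h := pvFindAllGo_eq w base.toList hsub (w.length + 1) 0 [] (Nat.zero_le _) (by omega)
    rw [Nat.cast_zero] at h
    simpa using h
  have hlenp := pvLocs_length (base.toList.length : Int) (pvPieces base.toList hsub w) 0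
  rw [hmatches] at hlenp
  have hnenil := pvPieces_ne_nil base.toList hsub w
  have hflag : PySem.Chars.isIn base.toList w = decide (1 < (pvPieces base.toList hsub w).length) := by
    by_cases hin : PySem.Chars.isIn base.toList w = true
    · have hne := (pvMatches_ne_nil_iff w base.toList hsub).mp hin
      have : 0 < (pvMatches w base.toList 0).length := List.length_pos_iff.mpr hne
      have hp : 0 < (pvPieces base.toList hsub w).length := List.length_pos_iff.mpr hnenil
      rw [hin]
      symm
      simp only [decide_eq_true_iff]
      omega
    · simp only [Bool.not_eq_true] at hin
      rw [hin]
      have hnil : pvMatches w base.toList 0 = [] := by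
        by_contra hne
        rw [(pvMatches_ne_nil_iff w base.toList hsub).mpr hne] at hin
        exact Bool.false_ne_true hin.symm
      rw [hnil] at hlenp
      simp only [List.length_nil] at hlenp
      symm
      simp only [decide_eq_false_iff_not]
      omega
  refine Prod.ext hflag ?_
  simp only []
  by_cases hin : PySem.Chars.isIn base.toList w = true
  · rw [if_pos hin, hfindall]
    rw [hfold, hmatches]
    simp only [List.nil_append, List.map_map]
    rfl
  · simp only [Bool.not_eq_true] at hin
    rw [hin]
    have hnil : pvMatches w base.toList 0 = [] := by
      by_contra hne
      rw [(pvMatches_ne_nil_iff w base.toList hsub).mpr hne] at hin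
      exact Bool.false_ne_true hin.symm
    rw [if_neg (by simp), hfold, hmatches, hnil]
    rfl
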